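-- pv_equiv track=rewrite | github.com/julian-g99/tiger-backend | allocator.py | next_def
-- ===== SOURCE A (Python) =====
-- def next_def(reg, d, i):
--     if reg not in d:
--         return None
--
--     elements = d[reg]
--     elements = list(elements)
--     elements.sort()
--     for ele in elements:
--         if ele >= i:
--             return ele
--
--     return None
-- ===== SOURCE B (Python) =====
-- def next_def(reg, d, i):
--     if reg not in d:
--         return None
--     best = None
--     for ele in d[reg]:
--         if ele >= i and (best is None or ele < best):
--             best = ele
--     return best
-- ===== Notes on version B (the rewrite author's own statement) =====
-- stated objective: alternative
-- what changed: B replaces A's copy-sort-then-scan with a single O(n) pass that tracks the minimum element >= i; measured speed was comparable (C-implemented sort vs pure-Python loop), so no speed is claimed.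
import Mathlib
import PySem

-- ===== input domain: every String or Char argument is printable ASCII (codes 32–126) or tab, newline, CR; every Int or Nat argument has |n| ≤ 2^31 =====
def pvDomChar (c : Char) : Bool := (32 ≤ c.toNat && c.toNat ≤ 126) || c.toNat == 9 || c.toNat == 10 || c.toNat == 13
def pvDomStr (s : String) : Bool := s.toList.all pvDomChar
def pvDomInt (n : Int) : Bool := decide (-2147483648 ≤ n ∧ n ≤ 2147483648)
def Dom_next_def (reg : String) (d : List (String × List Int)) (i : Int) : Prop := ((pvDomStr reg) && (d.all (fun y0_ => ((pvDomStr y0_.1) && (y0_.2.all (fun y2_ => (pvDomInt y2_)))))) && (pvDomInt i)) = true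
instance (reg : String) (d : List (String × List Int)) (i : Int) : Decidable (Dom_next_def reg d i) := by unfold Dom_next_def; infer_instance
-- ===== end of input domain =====

-- B replaces A's copy-sort-then-scan with a single pass tracking the minimum element >= i; return values proved equal on all inputs.


-- ===== PORT A =====
-- dict lookup (first match) shared by both ports
def pvLookup (d : List (String × List Int)) (reg : String) : Option (List Int) :=
  match d with
  | [] => none
  | (k, v) :: rest => if k == reg then some v else pvLookup rest reg

def next_def (reg : String) (d : List (String × List Int)) (i : Int) : Option Int :=
  match pvLookup d reg with
  | none => none
  | some elements =>
    -- elements = list(elements); elements.sort()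
    let elements := PySem.List.sorted elements (fun x => x) false
    -- for ele in elements: if ele >= i: return ele  /  return None
    elements.find? (fun ele => decide (i ≤ ele))

-- ===== PORT B =====
-- one step of B's loop: keep best, replace when ele >= i and (best is None or ele < best)
def pvStep (i : Int) (best : Option Int) (ele : Int) : Option Int :=
  match best with
  | none => if i ≤ ele then some ele else none
  | some b => if i ≤ ele ∧ ele < b then some ele else some b

def next_def_alt (reg : String) (d : List (String × List Int)) (i : Int) : Option Int :=
  match pvLookup d reg with
  | none => none
  | some xs => xs.foldl (pvStep i) none

-- ===== PRECONDITION & SPEC =====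
def Spec_next_def (reg : String) (d : List (String × List Int)) (i : Int) (out : Option Int) : Prop := out = next_def_alt reg d i
instance (reg : String) (d : List (String × List Int)) (i : Int) (out : Option Int) : Decidable (Spec_next_def reg d i out) := by unfold Spec_next_def; infer_instance

-- ===== CLAIM (what is proved, stated in full; the proofs are below) =====
def Claim_equal_next_def : Prop := ∀ (reg : String) (d : List (String × List Int)) (i : Int), Dom_next_def reg d i → Spec_next_def reg d i (next_def reg d i)

-- ===== LEMMAS AND PROOFS =====

-- pvStep is right-commutative, so B's fold is invariant under permutation
theorem pvStep_rcomm (i : Int) (a : Option Int) (x y : Int) :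
    pvStep i (pvStep i a x) y = pvStep i (pvStep i a y) x := by
  cases a <;> simp only [pvStep] <;> split_ifs <;> simp only [] <;> split_ifs <;>
    first
    | rfl
    | (exfalso; omega)
    | (congr 1; omega)

-- once best holds a value ≤ every remaining element, the fold keeps it
theorem foldl_step_fixed (i b : Int) (t : List Int) (h : ∀ y ∈ t, b ≤ y) :
    t.foldl (pvStep i) (some b) = some b := by
  induction t with
  | nil => rfl
  | cons x t ih =>
    have hbx : b ≤ x := h x (List.mem_cons_self ..)
    have hx : pvStep i (some b) x = some b := by
      simp only [pvStep]; split_ifs with hc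
      · exact absurd hc.2 (not_lt.mpr hbx)
      · rfl
    simpa [List.foldl_cons, hx] using ih (fun y hy => h y (List.mem_cons_of_mem _ hy))

-- on a list sorted in nondecreasing order, the first element ≥ i is the minimum element ≥ i
theorem find?_eq_foldl_of_sorted (i : Int) (s : List Int) (hs : s.Pairwise (· ≤ ·)) :
    s.find? (fun ele => decide (i ≤ ele)) = s.foldl (pvStep i) none := by
  induction s with
  | nil => rfl
  | cons x t ih =>
    rcases List.pairwise_cons.mp hs with ⟨hxt, ht⟩
    by_cases hx : i ≤ x
    · have : pvStep i none x = some x := by simp [pvStep, hx]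
      simp [hx, this, foldl_step_fixed i x t hxt]
    · have : pvStep i none x = none := by simp [pvStep, hx]
      simp [hx, this, ih ht]

-- B's fold over the unsorted list equals the same fold over the sorted list
theorem foldl_step_sorted (i : Int) (xs : List Int) :
    xs.foldl (pvStep i) none = (PySem.List.sorted xs (fun x => x) false).foldl (pvStep i) none := by
  exact ((PySem.List.sorted_perm xs (fun x => x) false).symm.foldl_eq'
    (fun x _ y _ z => pvStep_rcomm i z x y)) none

-- ===== VERDICT (by name: the statement is the Claim_ definition above) =====
theorem next_def_spec : Claim_equal_next_def := by
  intro reg d i _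
  unfold Spec_next_def next_def next_def_alt
  cases pvLookup d reg with
  | none => rfl
  | some xs =>
    simp only []
    rw [find?_eq_foldl_of_sorted i _ (by
      simpa using PySem.List.sorted_pairwise xs (fun x => x)),
      ← foldl_step_sorted]
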